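-- pv_equiv track=rewrite | github.com/josekoalas/atenea | Sesion_7/modulomc.py | order_factors
-- ===== SOURCE A (Python) =====
-- def order_factors(f):
-- 	n = []
-- 	e = []
-- 	for i in f:
-- 		if i in n:
-- 			ind = n.index(i)
-- 			e[ind] += 1
-- 		else:
-- 			n.append(i)
-- 			e.append(1)
-- 	return (n, e)
-- ===== SOURCE B (Python) =====
-- def order_factors(f):
-- 	n = list(dict.fromkeys(f))
-- 	e = [f.count(x) for x in n]
-- 	return (n, e)
-- ===== Notes on version B (the rewrite author's own statement) =====
-- stated objective: simpler
-- what changed: Replaces the single accumulation loop (membership test, list.index lookup and in-place counter increment) by two declarative passes: dedup in first-occurrence order via dict.fromkeys, then a per-key count with f.count.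
import Mathlib
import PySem

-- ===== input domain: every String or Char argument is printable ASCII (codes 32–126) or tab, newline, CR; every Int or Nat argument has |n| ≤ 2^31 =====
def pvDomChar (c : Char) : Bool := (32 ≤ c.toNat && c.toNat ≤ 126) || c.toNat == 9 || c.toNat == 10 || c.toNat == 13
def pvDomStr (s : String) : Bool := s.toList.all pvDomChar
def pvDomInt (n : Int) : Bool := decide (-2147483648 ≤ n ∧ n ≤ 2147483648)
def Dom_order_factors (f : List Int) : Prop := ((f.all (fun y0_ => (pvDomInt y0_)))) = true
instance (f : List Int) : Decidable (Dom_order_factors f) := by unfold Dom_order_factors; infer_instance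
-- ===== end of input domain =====

-- B replaces A's single accumulation loop by a dedup pass (dict.fromkeys) followed by a per-key counting pass; objective: simpler.

-- ===== PORT A =====
def order_factors (f : List Int) : List Int × List Int :=
  f.foldl (fun st i =>
    if st.1.contains i then
      let ind : Nat := (PySem.List.index? st.1 i).getD 0   -- n.index(i); the guard ensures it is found
      (st.1, PySem.List.pySetD st.2 (ind : Int) (PySem.List.pyGetD st.2 (ind : Int) 0 + 1))   -- e[ind] += 1
    else
      (st.1 ++ [i], st.2 ++ [(1 : Int)])) ([], [])

-- ===== PORT B =====
def order_factors_alt (f : List Int) : List Int × List Int :=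
  let n := PySem.List.dedup f                                -- list(dict.fromkeys(f))
  let e := n.map (fun x => (PySem.List.count f x : Int))     -- [f.count(x) for x in n]
  (n, e)

-- ===== PRECONDITION & SPEC =====
def Spec_order_factors (f : List Int) (out : List Int × List Int) : Prop := out = order_factors_alt f
instance (f : List Int) (out : List Int × List Int) : Decidable (Spec_order_factors f out) := by unfold Spec_order_factors; infer_instance

-- ===== CLAIM (what is proved, stated in full; the proofs are below) =====
def Claim_equal_order_factors : Prop := ∀ (f : List Int), Dom_order_factors f → Spec_order_factors f (order_factors f)

-- ===== LEMMAS AND PROOFS =====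

-- appending one element to the underlying list either leaves the dedup list unchanged or appends it
theorem ofList_append_singleton (p : List Int) (i : Int) :
    PySem.Set.ofList (p ++ [i]) =
      if (PySem.Set.ofList p).contains i then PySem.Set.ofList p else PySem.Set.ofList p ++ [i] := by
  simp [PySem.Set.ofList_eq_foldl, List.foldl_append, PySem.Set.add, PySem.Set.contains]

-- bumping the counter at i's (unique) index in the nodup key list = recounting over p ++ [i]
theorem step_mem (p : List Int) (i : Int) (k : Nat)
    (hk : PySem.List.index? (PySem.Set.ofList p) i = some k) :
    PySem.List.pySetD ((PySem.Set.ofList p).map (fun x => (PySem.List.count p x : Int))) (k : Int)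
      (PySem.List.pyGetD ((PySem.Set.ofList p).map (fun x => (PySem.List.count p x : Int))) (k : Int) 0 + 1)
    = (PySem.Set.ofList p).map (fun x => (PySem.List.count (p ++ [i]) x : Int)) := by
  obtain ⟨hklt, hgetk, -⟩ := PySem.List.getElem_of_index?_eq_some hk
  rw [PySem.List.pyGetD_natCast, PySem.List.pySetD_natCast]
  have hnd : (PySem.Set.ofList p).Nodup := PySem.Set.nodup_ofList p
  apply List.ext_getElem
  · simp
  · intro j hj hj'
    simp only [List.length_map] at hj'
    rw [List.getElem_set]
    rcases eq_or_ne j k with rfl | hjk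
    · simp [PySem.List.count, hgetk, hklt]
    · have hne : (PySem.Set.ofList p)[j] ≠ i := by
        intro hee
        exact hjk (hnd.getElem_inj_iff.mp (hee.trans hgetk.symm))
      have h0 : List.count ((PySem.Set.ofList p)[j]) [i] = 0 := by
        simp [List.count_eq_zero, hne]
      simp [PySem.List.count, Ne.symm hjk, List.count_append, h0]

-- one loop step preserves the invariant "state = (dedup of prefix, its counts)"
theorem step_eq (p : List Int) (i : Int) :
    (if (PySem.List.dedup p).contains i then
        let ind : Nat := (PySem.List.index? (PySem.List.dedup p) i).getD 0
        (PySem.List.dedup p,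
         PySem.List.pySetD ((PySem.List.dedup p).map (fun x => (PySem.List.count p x : Int))) (ind : Int)
           (PySem.List.pyGetD ((PySem.List.dedup p).map (fun x => (PySem.List.count p x : Int))) (ind : Int) 0 + 1))
      else
        (PySem.List.dedup p ++ [i], (PySem.List.dedup p).map (fun x => (PySem.List.count p x : Int)) ++ [(1 : Int)]))
    = (PySem.List.dedup (p ++ [i]), (PySem.List.dedup (p ++ [i])).map (fun x => (PySem.List.count (p ++ [i]) x : Int))) := by
  by_cases h : i ∈ p
  · have hmem : i ∈ PySem.Set.ofList p := by
      exact (PySem.Set.mem_ofList p i).mpr h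
    have hc : List.contains (PySem.Set.ofList p) i = true := by
      simp only [List.contains_eq_mem, decide_eq_true_eq]
      exact hmem
    obtain ⟨k, hk⟩ := Option.isSome_iff_exists.mp ((PySem.List.index?_isSome_iff _ _).mpr hmem)
    have hded : PySem.List.dedup (p ++ [i]) = PySem.List.dedup p := by
      simp [PySem.List.dedup_eq_ofList, ofList_append_singleton, h]
    simp only [PySem.List.dedup_eq_ofList] at hded ⊢
    rw [hded, if_pos hc, hk]
    simp only [Option.getD_some]
    exact Prod.ext rfl (step_mem p i k hk)
  · have hc : ¬ (List.contains (PySem.Set.ofList p) i = true) := by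
      simp only [List.contains_eq_mem, decide_eq_true_eq, PySem.Set.mem_ofList]
      exact h
    have hded : PySem.List.dedup (p ++ [i]) = PySem.List.dedup p ++ [i] := by
      simp [PySem.List.dedup_eq_ofList, ofList_append_singleton, h]
    have h2 : (PySem.Set.ofList p).map (fun x => (PySem.List.count p x : Int)) ++ [(1 : Int)]
        = (PySem.Set.ofList p ++ [i]).map (fun x => (PySem.List.count (p ++ [i]) x : Int)) := by
      rw [List.map_append]
      congr 1
      · apply List.map_congr_left
        intro x hx
        have hxp : x ∈ p := by
          exact (PySem.Set.mem_ofList p x).mp hx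
        have hxi : x ≠ i := fun he => h (he ▸ hxp)
        have h0 : List.count x [i] = 0 := by simp [List.count_eq_zero, hxi]
        simp [PySem.List.count, List.count_append, h0]
      · have h0 : List.count i p = 0 := List.count_eq_zero.mpr h
        simp [PySem.List.count, List.count_append, h0]
    simp only [PySem.List.dedup_eq_ofList] at hded ⊢
    rw [hded, if_neg hc, h2]

-- the loop invariant, by induction on the remaining input
theorem loop_inv (f : List Int) : ∀ (p : List Int),
    f.foldl (fun st i =>
      if st.1.contains i then
        let ind : Nat := (PySem.List.index? st.1 i).getD 0
        (st.1, PySem.List.pySetD st.2 (ind : Int) (PySem.List.pyGetD st.2 (ind : Int) 0 + 1))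
      else
        (st.1 ++ [i], st.2 ++ [(1 : Int)]))
      (PySem.List.dedup p, (PySem.List.dedup p).map (fun x => (PySem.List.count p x : Int)))
    = (PySem.List.dedup (p ++ f), (PySem.List.dedup (p ++ f)).map (fun x => (PySem.List.count (p ++ f) x : Int))) := by
  induction f with
  | nil => intro p; simp
  | cons i f ih =>
    intro p
    rw [List.foldl_cons]
    have hs := step_eq p i
    simp only at hs ⊢
    rw [hs, ih (p ++ [i])]
    simp

-- ===== VERDICT (by name: the statement is the Claim_ definition above) =====
theorem order_factors_spec : Claim_equal_order_factors := by
  intro f _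
  unfold Spec_order_factors order_factors order_factors_alt
  have h := loop_inv f []
  simpa using h
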